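-- pv_equiv track=rewrite | github.com/Flyvendedk799/preview | backend/services/design_fidelity_validator.py | _styles_compatible
-- ===== SOURCE A (Python) =====
-- def _styles_compatible(s1: str, s2: str) -> bool:
--     """Check if design styles are compatible."""
--     compatible_groups = [
--         ["minimalist", "corporate", "technical"],
--         ["luxurious", "elegant", "editorial"],
--         ["playful", "organic", "friendly"],
--         ["bold", "maximalist", "expressive"]
--     ]
--
--     for group in compatible_groups:
--         if s1.lower() in group and s2.lower() in group:
--             return True
--     return False
-- ===== SOURCE B (Python) =====
-- _GROUPS = [
--     ["minimalist", "corporate", "technical"],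
--     ["luxurious", "elegant", "editorial"],
--     ["playful", "organic", "friendly"],
--     ["bold", "maximalist", "expressive"],
-- ]
-- _GROUP_OF = {name: i for i, group in enumerate(_GROUPS) for name in group}
--
--
-- def _styles_compatible(s1: str, s2: str) -> bool:
--     g1 = _GROUP_OF.get(s1.lower())
--     return g1 is not None and g1 == _GROUP_OF.get(s2.lower())
-- ===== Notes on version B (the rewrite author's own statement) =====
-- stated objective: idiomatic
-- what changed: Replaced the per-call scan over the four groups (two membership tests per group) by a module-level dict mapping each style name to its group index, built once; the body is two dict lookups and an equality check guarded against the unknown/unknown case.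
import Mathlib
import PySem

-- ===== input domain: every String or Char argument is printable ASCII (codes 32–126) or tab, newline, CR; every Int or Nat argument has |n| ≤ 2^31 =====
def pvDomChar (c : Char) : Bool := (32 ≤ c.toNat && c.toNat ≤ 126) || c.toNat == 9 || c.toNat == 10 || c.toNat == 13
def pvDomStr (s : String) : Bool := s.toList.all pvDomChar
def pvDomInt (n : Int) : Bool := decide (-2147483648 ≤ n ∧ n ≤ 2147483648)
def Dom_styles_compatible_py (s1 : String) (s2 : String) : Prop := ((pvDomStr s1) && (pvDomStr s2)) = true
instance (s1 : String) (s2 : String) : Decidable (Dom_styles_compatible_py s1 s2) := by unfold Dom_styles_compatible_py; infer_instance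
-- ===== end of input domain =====

-- B replaces A's per-call scan over the four groups by a name → group-index dict built once; return value only, no side effects.

-- ===== PORT A =====
def pvGroupsA : List (List String) :=
  [["minimalist", "corporate", "technical"],
   ["luxurious", "elegant", "editorial"],
   ["playful", "organic", "friendly"],
   ["bold", "maximalist", "expressive"]]

-- the 'for group in compatible_groups' loop with its early return
def pvLoopA (t1 t2 : String) : List (List String) → Bool
  | [] => false
  | g :: rest => if g.contains t1 && g.contains t2 then true else pvLoopA t1 t2 rest

def styles_compatible_py (s1 : String) (s2 : String) : Bool :=
  pvLoopA (PySem.Str.lower s1) (PySem.Str.lower s2) pvGroupsA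

-- ===== PORT B =====
def pvGroupsB : List (List String) :=
  [["minimalist", "corporate", "technical"],
   ["luxurious", "elegant", "editorial"],
   ["playful", "organic", "friendly"],
   ["bold", "maximalist", "expressive"]]

-- the dict comprehension {name: i for i, group in enumerate(_GROUPS) for name in group}
def pvGroupOf : PySem.Dict String Int :=
  (PySem.List.enumerate pvGroupsB).foldl
    (fun d p => p.2.foldl (fun d name => d.insert name p.1) d) PySem.Dict.empty

def styles_compatible_py_alt (s1 : String) (s2 : String) : Bool :=
  match pvGroupOf.get? (PySem.Str.lower s1) with
  | none => false
  | some g1 => some g1 == pvGroupOf.get? (PySem.Str.lower s2)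

-- ===== PRECONDITION & SPEC =====
def Spec_styles_compatible_py (s1 : String) (s2 : String) (out : Bool) : Prop := out = styles_compatible_py_alt s1 s2
instance (s1 : String) (s2 : String) (out : Bool) : Decidable (Spec_styles_compatible_py s1 s2 out) := by unfold Spec_styles_compatible_py; infer_instance

-- ===== CLAIM (what is proved, stated in full; the proofs are below) =====
def Claim_equal_styles_compatible_py : Prop := ∀ (s1 : String) (s2 : String), Dom_styles_compatible_py s1 s2 → Spec_styles_compatible_py s1 s2 (styles_compatible_py s1 s2)

-- ===== LEMMAS AND PROOFS =====

-- proof-side literal form of the built dict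
def pvLit : PySem.Dict String Int := PySem.Dict.mk
    [("minimalist", 0), ("corporate", 0), ("technical", 0),
     ("luxurious", 1), ("elegant", 1), ("editorial", 1),
     ("playful", 2), ("organic", 2), ("friendly", 2),
     ("bold", 3), ("maximalist", 3), ("expressive", 3)]

set_option maxHeartbeats 2000000 in
theorem pvGroupOf_eq : pvGroupOf = pvLit := by decide

set_option maxHeartbeats 1000000 in
theorem pvG0 (t : String) :
    (t == "minimalist" || (t == "corporate" || t == "technical")) = (pvLit.get? t == some 0) := by
  by_cases h1 : t = "minimalist"
  · subst h1; decide
  by_cases h2 : t = "corporate"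
  · subst h2; decide
  by_cases h3 : t = "technical"
  · subst h3; decide
  by_cases h4 : t = "luxurious"
  · subst h4; decide
  by_cases h5 : t = "elegant"
  · subst h5; decide
  by_cases h6 : t = "editorial"
  · subst h6; decide
  by_cases h7 : t = "playful"
  · subst h7; decide
  by_cases h8 : t = "organic"
  · subst h8; decide
  by_cases h9 : t = "friendly"
  · subst h9; decide
  by_cases h10 : t = "bold"
  · subst h10; decide
  by_cases h11 : t = "maximalist"
  · subst h11; decide
  by_cases h12 : t = "expressive"
  · subst h12; decide
  simp only [pvLit, PySem.Dict.get?_mk_cons, Ne.symm h1, Ne.symm h2, Ne.symm h3, Ne.symm h4, Ne.symm h5, Ne.symm h6, Ne.symm h7, Ne.symm h8, Ne.symm h9, Ne.symm h10, Ne.symm h11, Ne.symm h12, beq_iff_eq]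
  have hz : ({ items := [] } : PySem.Dict String Int).get? t = none := by
    simp [PySem.Dict.get?]
  rw [hz]
  simp [h1, h2, h3]

set_option maxHeartbeats 1000000 in
theorem pvG1 (t : String) :
    (t == "luxurious" || (t == "elegant" || t == "editorial")) = (pvLit.get? t == some 1) := by
  by_cases h1 : t = "minimalist"
  · subst h1; decide
  by_cases h2 : t = "corporate"
  · subst h2; decide
  by_cases h3 : t = "technical"
  · subst h3; decide
  by_cases h4 : t = "luxurious"
  · subst h4; decide
  by_cases h5 : t = "elegant"
  · subst h5; decide
  by_cases h6 : t = "editorial"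
  · subst h6; decide
  by_cases h7 : t = "playful"
  · subst h7; decide
  by_cases h8 : t = "organic"
  · subst h8; decide
  by_cases h9 : t = "friendly"
  · subst h9; decide
  by_cases h10 : t = "bold"
  · subst h10; decide
  by_cases h11 : t = "maximalist"
  · subst h11; decide
  by_cases h12 : t = "expressive"
  · subst h12; decide
  simp only [pvLit, PySem.Dict.get?_mk_cons, Ne.symm h1, Ne.symm h2, Ne.symm h3, Ne.symm h4, Ne.symm h5, Ne.symm h6, Ne.symm h7, Ne.symm h8, Ne.symm h9, Ne.symm h10, Ne.symm h11, Ne.symm h12, beq_iff_eq]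
  have hz : ({ items := [] } : PySem.Dict String Int).get? t = none := by
    simp [PySem.Dict.get?]
  rw [hz]
  simp [h4, h5, h6]

set_option maxHeartbeats 1000000 in
theorem pvG2 (t : String) :
    (t == "playful" || (t == "organic" || t == "friendly")) = (pvLit.get? t == some 2) := by
  by_cases h1 : t = "minimalist"
  · subst h1; decide
  by_cases h2 : t = "corporate"
  · subst h2; decide
  by_cases h3 : t = "technical"
  · subst h3; decide
  by_cases h4 : t = "luxurious"
  · subst h4; decide
  by_cases h5 : t = "elegant"
  · subst h5; decide
  by_cases h6 : t = "editorial"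
  · subst h6; decide
  by_cases h7 : t = "playful"
  · subst h7; decide
  by_cases h8 : t = "organic"
  · subst h8; decide
  by_cases h9 : t = "friendly"
  · subst h9; decide
  by_cases h10 : t = "bold"
  · subst h10; decide
  by_cases h11 : t = "maximalist"
  · subst h11; decide
  by_cases h12 : t = "expressive"
  · subst h12; decide
  simp only [pvLit, PySem.Dict.get?_mk_cons, Ne.symm h1, Ne.symm h2, Ne.symm h3, Ne.symm h4, Ne.symm h5, Ne.symm h6, Ne.symm h7, Ne.symm h8, Ne.symm h9, Ne.symm h10, Ne.symm h11, Ne.symm h12, beq_iff_eq]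
  have hz : ({ items := [] } : PySem.Dict String Int).get? t = none := by
    simp [PySem.Dict.get?]
  rw [hz]
  simp [h7, h8, h9]

set_option maxHeartbeats 1000000 in
theorem pvG3 (t : String) :
    (t == "bold" || (t == "maximalist" || t == "expressive")) = (pvLit.get? t == some 3) := by
  by_cases h1 : t = "minimalist"
  · subst h1; decide
  by_cases h2 : t = "corporate"
  · subst h2; decide
  by_cases h3 : t = "technical"
  · subst h3; decide
  by_cases h4 : t = "luxurious"
  · subst h4; decide
  by_cases h5 : t = "elegant"
  · subst h5; decide
  by_cases h6 : t = "editorial"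
  · subst h6; decide
  by_cases h7 : t = "playful"
  · subst h7; decide
  by_cases h8 : t = "organic"
  · subst h8; decide
  by_cases h9 : t = "friendly"
  · subst h9; decide
  by_cases h10 : t = "bold"
  · subst h10; decide
  by_cases h11 : t = "maximalist"
  · subst h11; decide
  by_cases h12 : t = "expressive"
  · subst h12; decide
  simp only [pvLit, PySem.Dict.get?_mk_cons, Ne.symm h1, Ne.symm h2, Ne.symm h3, Ne.symm h4, Ne.symm h5, Ne.symm h6, Ne.symm h7, Ne.symm h8, Ne.symm h9, Ne.symm h10, Ne.symm h11, Ne.symm h12, beq_iff_eq]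
  have hz : ({ items := [] } : PySem.Dict String Int).get? t = none := by
    simp [PySem.Dict.get?]
  rw [hz]
  simp [h10, h11, h12]

set_option maxHeartbeats 1000000 in
theorem pvGvals (t : String) :
    pvLit.get? t = none ∨ pvLit.get? t = some 0 ∨ pvLit.get? t = some 1 ∨
      pvLit.get? t = some 2 ∨ pvLit.get? t = some 3 := by
  by_cases h1 : t = "minimalist"
  · subst h1; decide
  by_cases h2 : t = "corporate"
  · subst h2; decide
  by_cases h3 : t = "technical"
  · subst h3; decide
  by_cases h4 : t = "luxurious"
  · subst h4; decide
  by_cases h5 : t = "elegant"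
  · subst h5; decide
  by_cases h6 : t = "editorial"
  · subst h6; decide
  by_cases h7 : t = "playful"
  · subst h7; decide
  by_cases h8 : t = "organic"
  · subst h8; decide
  by_cases h9 : t = "friendly"
  · subst h9; decide
  by_cases h10 : t = "bold"
  · subst h10; decide
  by_cases h11 : t = "maximalist"
  · subst h11; decide
  by_cases h12 : t = "expressive"
  · subst h12; decide
  simp only [pvLit, PySem.Dict.get?_mk_cons, Ne.symm h1, Ne.symm h2, Ne.symm h3, Ne.symm h4, Ne.symm h5, Ne.symm h6, Ne.symm h7, Ne.symm h8, Ne.symm h9, Ne.symm h10, Ne.symm h11, Ne.symm h12, beq_iff_eq]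
  have hz : ({ items := [] } : PySem.Dict String Int).get? t = none := by
    simp [PySem.Dict.get?]
  rw [hz]
  exact Or.inl hz

set_option maxHeartbeats 1000000 in
theorem pvLoop_eq_lookup (t1 t2 : String) :
    pvLoopA t1 t2 pvGroupsA =
      (match pvLit.get? t1 with
       | none => false
       | some g1 => some g1 == pvLit.get? t2) := by
  simp only [pvGroupsA, pvLoopA, List.contains_cons, List.contains_nil, Bool.or_false]
  rw [pvG0 t1, pvG0 t2, pvG1 t1, pvG1 t2, pvG2 t1, pvG2 t2, pvG3 t1, pvG3 t2]
  rcases pvGvals t1 with h1 | h1 | h1 | h1 | h1 <;>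
    rcases pvGvals t2 with h2 | h2 | h2 | h2 | h2 <;> rw [h1, h2] <;> simp

-- ===== VERDICT (by name: the statement is the Claim_ definition above) =====
theorem styles_compatible_py_spec : Claim_equal_styles_compatible_py := by
  intro s1 s2 _
  unfold Spec_styles_compatible_py styles_compatible_py styles_compatible_py_alt
  rw [pvGroupOf_eq]
  exact pvLoop_eq_lookup (PySem.Str.lower s1) (PySem.Str.lower s2)
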